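-- pv_equiv track=rewrite | github.com/KNU-HAEDAL/baekjoon-per-day | 김강민/08/0803/[프로그래머스] 팩토리얼.py | solution
-- ===== SOURCE A (Python) =====
-- def solution(n):
--     fac = 1
--     answer = 1
--     while fac <= n:
--         answer += 1
--         fac *= answer
--     answer -= 1
--     return answer
-- ===== SOURCE B (Python) =====
-- import math
--
-- def solution(n):
--     k = 1
--     while math.factorial(k) <= n:
--         k += 1
--     return k - 1
-- ===== Notes on version B (the rewrite author's own statement) =====
-- stated objective: idiomatic
-- what changed: Instead of A's running accumulator that multiplies the factorial incrementally alongside the counter, B keeps only a counter k and recomputes math.factorial(k) from scratch each iteration, returning k-1 at the first k whose factorial exceeds n.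
import Mathlib
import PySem

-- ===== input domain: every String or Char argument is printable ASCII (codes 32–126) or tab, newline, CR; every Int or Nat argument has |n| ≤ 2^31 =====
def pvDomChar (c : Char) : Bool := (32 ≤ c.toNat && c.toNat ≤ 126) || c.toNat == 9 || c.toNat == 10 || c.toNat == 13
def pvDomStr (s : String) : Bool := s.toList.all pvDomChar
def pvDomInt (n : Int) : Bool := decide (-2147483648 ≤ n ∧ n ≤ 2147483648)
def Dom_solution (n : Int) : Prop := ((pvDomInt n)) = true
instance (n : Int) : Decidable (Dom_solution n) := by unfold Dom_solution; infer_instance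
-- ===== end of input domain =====

-- B replaces A's running factorial accumulator by a counter k whose factorial is
-- recomputed from scratch (math.factorial) each iteration; objective: idiomatic.

-- ===== PORT A =====
-- A's while loop: state (fac, answer); the '1 ≤ fac ∧ 1 ≤ answer' conjuncts are totality
-- guards only (both start at 1 and only grow), needed for the termination measure.
def solutionLoop (n : Int) (fac answer : Nat) : Int :=
  if h : (fac : Int) ≤ n ∧ 1 ≤ fac ∧ 1 ≤ answer then
    solutionLoop n (fac * (answer + 1)) (answer + 1)
  else
    (answer : Int) - 1
termination_by n.toNat + 1 - fac
decreasing_by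
  obtain ⟨ha, hb, hc⟩ := h
  have h1 : fac ≤ n.toNat := by omega
  have h2 : fac * 2 ≤ fac * (answer + 1) := Nat.mul_le_mul le_rfl (by omega)
  omega

def solution (n : Int) : Int := solutionLoop n 1 1

-- ===== PORT B =====
-- B's while loop: only the counter k; math.factorial(k) ports to Nat.factorial.
def solutionAltLoop (n : Int) (k : Nat) : Int :=
  if (k.factorial : Int) ≤ n then
    solutionAltLoop n (k + 1)
  else
    (k : Int) - 1
termination_by n.toNat + 1 - k
decreasing_by
  have h1 : k ≤ k.factorial := Nat.self_le_factorial k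
  have h2 : (1 : Int) ≤ (k.factorial : Int) := by exact_mod_cast Nat.one_le_iff_ne_zero.mpr k.factorial_ne_zero
  have h3 : k.factorial ≤ n.toNat := by omega
  omega

def solution_alt (n : Int) : Int := solutionAltLoop n 1

-- ===== PRECONDITION & SPEC =====
def Spec_solution (n : Int) (out : Int) : Prop := out = solution_alt n
instance (n : Int) (out : Int) : Decidable (Spec_solution n out) := by unfold Spec_solution; infer_instance

-- ===== CLAIM (what is proved, stated in full; the proofs are below) =====
def Claim_equal_solution : Prop := ∀ (n : Int), Dom_solution n → Spec_solution n (solution n)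

-- ===== LEMMAS AND PROOFS =====

-- Invariant of A's loop: fac = answer!, so both loops run in lock-step on the counter.
theorem loop_eq (m : Nat) : ∀ (n : Int) (answer : Nat), 1 ≤ answer → n.toNat + 1 - answer ≤ m →
    solutionLoop n answer.factorial answer = solutionAltLoop n answer := by
  induction m with
  | zero =>
    intro n answer hans hm
    have hpos : 1 ≤ answer.factorial := Nat.one_le_iff_ne_zero.mpr answer.factorial_ne_zero
    have hcond : ¬ ((answer.factorial : Int) ≤ n) := by
      intro hle
      have h1 : answer ≤ answer.factorial := Nat.self_le_factorial answer
      have : (answer.factorial : Nat) ≤ n.toNat := by omega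
      omega
    rw [solutionLoop, solutionAltLoop]
    simp [hcond, hpos]
  | succ m ih =>
    intro n answer hans hm
    have hpos : 1 ≤ answer.factorial := Nat.one_le_iff_ne_zero.mpr answer.factorial_ne_zero
    by_cases hc : (answer.factorial : Int) ≤ n
    · rw [solutionLoop, solutionAltLoop]
      rw [dif_pos ⟨hc, hpos, hans⟩, if_pos hc]
      have hfac : answer.factorial * (answer + 1) = (answer + 1).factorial := by
        rw [Nat.factorial_succ]; ring
      rw [hfac]
      apply ih _ _ (by omega)
      have h1 : answer ≤ answer.factorial := Nat.self_le_factorial answer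
      have : (answer.factorial : Nat) ≤ n.toNat := by omega
      omega
    · rw [solutionLoop, solutionAltLoop]
      simp [hc, hpos]

-- ===== VERDICT (by name: the statement is the Claim_ definition above) =====
theorem solution_spec : Claim_equal_solution := by
  intro n _
  unfold Spec_solution solution solution_alt
  have h := loop_eq (n.toNat + 1) n 1 (by omega) (by omega)
  have e : (1 : Nat).factorial = 1 := rfl
  rw [e] at h
  exact h
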